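-- pv_equiv track=rewrite | github.com/pypi-data/pypi-mirror-392 | packages/wot-pdf/wot_pdf-1.2.6.tar.gz/wot_pdf-1.2.6/src/wot_pdf/engines/reportlab_advanced_features.py | _optimize_paragraphs
-- ===== SOURCE A (Python) =====
-- def _optimize_paragraphs(content: str) -> str:
--     """Optimize paragraph structure for better ReportLab rendering"""
--     lines = content.split('\n')
--     optimized_lines = []
--
--     in_code_block = False
--     current_paragraph = []
--
--     for line in lines:
--         stripped = line.strip()
--
--         # Track code blocks
--         if stripped.startswith('```'):
--             in_code_block = not in_code_block
--             if current_paragraph: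
--                 optimized_lines.extend(current_paragraph)
--                 current_paragraph = []
--             optimized_lines.append(line)
--             continue
--
--         if in_code_block:
--             optimized_lines.append(line)
--             continue
--
--         # Handle empty lines and paragraph breaks
--         if not stripped:
--             if current_paragraph:
--                 # Join current paragraph with proper spacing
--                 paragraph_text = ' '.join(current_paragraph)
--                 if len(paragraph_text) > 200:  # Split long paragraphs
--                     sentences = paragraph_text.split('. ')
--                     if len(sentences) > 2:
--                         mid_point = len(sentences) // 2
--                         part1 = '. '.join(sentences[:mid_point]) + '.'
--                         part2 = '. '.join(sentences[mid_point:])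
--                         optimized_lines.extend([part1, '', part2])
--                     else:
--                         optimized_lines.append(paragraph_text)
--                 else:
--                     optimized_lines.append(paragraph_text)
--                 current_paragraph = []
--             optimized_lines.append('')
--         else:
--             # Check if this starts a new structure (headers, lists, etc.)
--             if (stripped.startswith('#') or stripped.startswith('-') or
--                 stripped.startswith('*') or stripped.startswith('1.')):
--                 if current_paragraph:
--                     paragraph_text = ' '.join(current_paragraph)
--                     optimized_lines.append(paragraph_text)
--                     current_paragraph = []
--                 optimized_lines.append(line)
--             else:
--                 current_paragraph.append(stripped)
--
--     # Handle remaining paragraph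
--     if current_paragraph:
--         paragraph_text = ' '.join(current_paragraph)
--         optimized_lines.append(paragraph_text)
--
--     return '\n'.join(optimized_lines)
-- ===== SOURCE B (Python) =====
-- def _optimize_paragraphs(content: str) -> str:
--     """Two-pass rewrite: tokenize lines into verbatim/blank/paragraph tokens, then render."""
--     # Pass 1: tokenize.  Token kinds: ('verb', line), ('blank',), ('para', lines, ended_by_blank)
--     tokens = []
--     in_code = False
--     group = []
--     for line in content.split('\n'):
--         s = line.strip()
--         if s.startswith('```'):
--             in_code = not in_code
--             if group:
--                 tokens.append(('lines', group))
--                 group = []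
--             tokens.append(('verb', line))
--         elif in_code:
--             tokens.append(('verb', line))
--         elif not s:
--             if group:
--                 tokens.append(('para', group, True))
--                 group = []
--             tokens.append(('blank',))
--         elif s.startswith(('#', '-', '*', '1.')):
--             if group:
--                 tokens.append(('para', group, False))
--                 group = []
--             tokens.append(('verb', line))
--         else:
--             group.append(s)
--     if group:
--         tokens.append(('para', group, False))
--
--     # Pass 2: render tokens to output lines.
--     out = []
--     for tok in tokens:
--         if tok[0] == 'verb':
--             out.append(tok[1])
--         elif tok[0] == 'lines':
--             out.extend(tok[1])
--         elif tok[0] == 'blank':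
--             out.append('')
--         else:
--             _, lines, ended_by_blank = tok
--             text = ' '.join(lines)
--             if ended_by_blank and len(text) > 200:
--                 sentences = text.split('. ')
--                 if len(sentences) > 2:
--                     mid = len(sentences) // 2
--                     out.append('. '.join(sentences[:mid]) + '.')
--                     out.append('')
--                     out.append('. '.join(sentences[mid:]))
--                 else:
--                     out.append(text)
--             else:
--                 out.append(text)
--     return '\n'.join(out)
-- ===== Notes on version B (the rewrite author's own statement) =====
-- stated objective: alternative
-- what changed: A's single loop that interleaves paragraph accumulation with output emission is split into two passes: a tokenizer that classifies lines into verbatim/blank/paragraph tokens (recording how each paragraph was terminated), and a separate renderer that turns tokens into output lines, joining and splitting paragraphs only there.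
import Mathlib
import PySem

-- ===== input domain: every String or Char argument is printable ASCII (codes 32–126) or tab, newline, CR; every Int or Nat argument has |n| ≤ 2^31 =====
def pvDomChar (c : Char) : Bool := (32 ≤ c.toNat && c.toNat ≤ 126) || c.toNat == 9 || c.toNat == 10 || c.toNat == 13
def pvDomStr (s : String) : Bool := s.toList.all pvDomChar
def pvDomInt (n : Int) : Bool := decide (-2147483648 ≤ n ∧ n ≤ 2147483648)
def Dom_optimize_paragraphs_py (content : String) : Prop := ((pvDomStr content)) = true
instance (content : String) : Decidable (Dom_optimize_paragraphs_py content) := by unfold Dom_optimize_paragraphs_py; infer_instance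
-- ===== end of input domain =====

-- B rewrites A's single accumulating loop as two passes (tokenize lines, then render tokens);
-- objective: alternative decomposition, same cost.  Return value only; neither mutates arguments.

-- ===== PORT A =====
-- line starts a structural element (header / list / enumeration)
def aIsStruct (s : String) : Bool :=
  PySem.Str.startswith s "#" || PySem.Str.startswith s "-" ||
  PySem.Str.startswith s "*" || PySem.Str.startswith s "1."

-- A's blank-line branch: join the paragraph, split it in two halves if long.
-- sentences[:mid] / sentences[mid:] with 0 ≤ mid ≤ len are exactly take/drop; split(". ") is PySem.Str.split? (sep ≠ "" so getD never fires).
def aEmitPara (cur : List String) : List String :=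
  let text := PySem.Str.join " " cur
  if PySem.Str.len text > 200 then
    let sentences := ((PySem.Str.split? text ". ").getD [])
    if sentences.length > 2 then
      let mid := sentences.length / 2
      [PySem.Str.join ". " (sentences.take mid) ++ ".", "", PySem.Str.join ". " (sentences.drop mid)]
    else [text]
  else [text]

-- loop body of A: state = (in_code_block, current_paragraph, optimized_lines)
def aStep (st : Bool × List String × List String) (line : String) : Bool × List String × List String :=
  match st with
  | (inCode, cur, out) =>
    let stripped := PySem.Str.strip line
    if PySem.Str.startswith stripped "```" then
      (!inCode, [], (if cur.isEmpty then out else out ++ cur) ++ [line])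
    else if inCode then
      (inCode, cur, out ++ [line])
    else if stripped = "" then
      (inCode, [], (if cur.isEmpty then out else out ++ aEmitPara cur) ++ [""])
    else if aIsStruct stripped then
      (inCode, [], (if cur.isEmpty then out else out ++ [PySem.Str.join " " cur]) ++ [line])
    else
      (inCode, cur ++ [stripped], out)

def optimize_paragraphs_py (content : String) : String :=
  match (((PySem.Str.split? content "\n").getD [])).foldl aStep (false, [], []) with
  | (_, cur, out) =>
    PySem.Str.join "\n" (if cur.isEmpty then out else out ++ [PySem.Str.join " " cur])

-- ===== PORT B =====
-- token kinds of Source B: ('verb', l) / ('lines', ls) / ('blank',) / ('para', group, ended_by_blank)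
inductive PTok where
  | verb  : String → PTok
  | lines : List String → PTok
  | blank : PTok
  | para  : List String → Bool → PTok
deriving Repr, DecidableEq

def bIsStruct (s : String) : Bool :=
  PySem.Str.startswith s "#" || PySem.Str.startswith s "-" ||
  PySem.Str.startswith s "*" || PySem.Str.startswith s "1."

-- pass 1 loop body: state = (in_code, group, tokens)
def bStep (st : Bool × List String × List PTok) (line : String) : Bool × List String × List PTok :=
  match st with
  | (inCode, group, toks) =>
    let s := PySem.Str.strip line
    if PySem.Str.startswith s "```" then
      (!inCode, [], (if group.isEmpty then toks else toks ++ [PTok.lines group]) ++ [PTok.verb line])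
    else if inCode then
      (inCode, group, toks ++ [PTok.verb line])
    else if s = "" then
      (inCode, [], (if group.isEmpty then toks else toks ++ [PTok.para group true]) ++ [PTok.blank])
    else if bIsStruct s then
      (inCode, [], (if group.isEmpty then toks else toks ++ [PTok.para group false]) ++ [PTok.verb line])
    else
      (inCode, group ++ [s], toks)

-- pass 2: render one token into output lines
def bRender1 (t : PTok) : List String :=
  match t with
  | .verb l => [l]
  | .lines ls => ls
  | .blank => [""]
  | .para g endedByBlank =>
    let text := PySem.Str.join " " g
    if endedByBlank && decide (PySem.Str.len text > 200) then
      let sentences := ((PySem.Str.split? text ". ").getD [])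
      if sentences.length > 2 then
        let mid := sentences.length / 2
        [PySem.Str.join ". " (sentences.take mid) ++ ".", "", PySem.Str.join ". " (sentences.drop mid)]
      else [text]
    else [text]

def optimize_paragraphs_py_alt (content : String) : String :=
  match (((PySem.Str.split? content "\n").getD [])).foldl bStep (false, [], []) with
  | (_, group, toks) =>
    let toks := if group.isEmpty then toks else toks ++ [PTok.para group false]
    PySem.Str.join "\n" (toks.flatMap bRender1)

-- ===== PRECONDITION & SPEC =====
def Spec_optimize_paragraphs_py (content : String) (out : String) : Prop := out = optimize_paragraphs_py_alt content
instance (content : String) (out : String) : Decidable (Spec_optimize_paragraphs_py content out) := by unfold Spec_optimize_paragraphs_py; infer_instance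

-- ===== CLAIM (what is proved, stated in full; the proofs are below) =====
def Claim_equal_optimize_paragraphs_py : Prop := ∀ (content : String), Dom_optimize_paragraphs_py content → Spec_optimize_paragraphs_py content (optimize_paragraphs_py content)

-- ===== LEMMAS AND PROOFS =====

-- rendering equations for the token kinds (B's pass 2 vs A's inline emissions)
theorem r_verb (l : String) : bRender1 (PTok.verb l) = [l] := rfl
theorem r_lines (ls : List String) : bRender1 (PTok.lines ls) = ls := rfl
theorem r_blank : bRender1 PTok.blank = [""] := rfl
theorem r_para_false (g : List String) : bRender1 (PTok.para g false) = [PySem.Str.join " " g] := by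
  simp [bRender1]
theorem r_para_true (g : List String) : bRender1 (PTok.para g true) = aEmitPara g := by
  simp [bRender1, aEmitPara]

-- one line: A's step on the rendered output matches B's step on the tokens
theorem step_rel (c : Bool) (cur : List String) (toks : List PTok) (line : String) :
    aStep (c, cur, toks.flatMap bRender1) line =
      ((bStep (c, cur, toks) line).1, (bStep (c, cur, toks) line).2.1,
        ((bStep (c, cur, toks) line).2.2).flatMap bRender1) := by
  simp only [aStep, bStep, aIsStruct, bIsStruct]
  split_ifs <;>
    simp_all [List.flatMap_append, r_verb, r_lines, r_blank, r_para_false, r_para_true]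

-- whole fold: A's state tracks B's state with rendered tokens
theorem fold_rel (lines : List String) : ∀ (c : Bool) (cur : List String) (toks : List PTok),
    lines.foldl aStep (c, cur, toks.flatMap bRender1) =
      ((lines.foldl bStep (c, cur, toks)).1, (lines.foldl bStep (c, cur, toks)).2.1,
        ((lines.foldl bStep (c, cur, toks)).2.2).flatMap bRender1) := by
  induction lines with
  | nil => intro c cur toks; simp
  | cons l ls ih =>
    intro c cur toks
    simp only [List.foldl_cons, step_rel]
    generalize bStep (c, cur, toks) l = st
    obtain ⟨c', cur', toks'⟩ := st
    exact ih c' cur' toks'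

-- ===== VERDICT (by name: the statement is the Claim_ definition above) =====
theorem optimize_paragraphs_py_spec : Claim_equal_optimize_paragraphs_py := by
  intro content _
  unfold Spec_optimize_paragraphs_py optimize_paragraphs_py optimize_paragraphs_py_alt
  have h := fold_rel (((PySem.Str.split? content "\n").getD [])) false [] []
  rw [show (([] : List PTok).flatMap bRender1) = ([] : List String) from rfl] at h
  rw [h]
  obtain ⟨c, group, toks⟩ := (((PySem.Str.split? content "\n").getD [])).foldl bStep (false, [], [])
  by_cases hg : group.isEmpty <;>
    simp [hg, List.flatMap_append, r_para_false]
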